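-- pv_equiv track=rewrite | github.com/tulip-control/omega | omega/symbolic/cover_enum.py | _lm_tail
-- ===== SOURCE A (Python) =====
-- def _lm_tail(k, lm):
--     """Return elements of `Lm` with indices `k..N`."""
--     n = len(lm)
--     assert k >= 1, k
--     assert k <= n, (k, n)
--     start = k - 1
--     assert start >= 0, start
--     r = lm[start]
--     for i in range(start, n):
--         r |= lm[i]
--     return r
-- ===== SOURCE B (Python) =====
-- def _lm_tail(k, lm):
--     """Return elements of `Lm` with indices `k..N`."""
--     n = len(lm)
--     assert k >= 1, k
--     assert k <= n, (k, n)
--     start = k - 1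
--
--     def _reduce(lo, hi):
--         # OR-reduce lm[lo:hi] by balanced splitting (hi > lo).
--         if hi - lo == 1:
--             return lm[lo]
--         mid = (lo + hi) // 2
--         return _reduce(lo, mid) | _reduce(mid, hi)
--
--     return _reduce(start, n)
-- ===== Notes on version B (the rewrite author's own statement) =====
-- stated objective: alternative
-- what changed: Replaces A's left-to-right accumulator loop (which also ORs the first element twice) with a recursive balanced divide-and-conquer OR-reduction over the index range; equal by associativity and idempotence of |.
import Mathlib
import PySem

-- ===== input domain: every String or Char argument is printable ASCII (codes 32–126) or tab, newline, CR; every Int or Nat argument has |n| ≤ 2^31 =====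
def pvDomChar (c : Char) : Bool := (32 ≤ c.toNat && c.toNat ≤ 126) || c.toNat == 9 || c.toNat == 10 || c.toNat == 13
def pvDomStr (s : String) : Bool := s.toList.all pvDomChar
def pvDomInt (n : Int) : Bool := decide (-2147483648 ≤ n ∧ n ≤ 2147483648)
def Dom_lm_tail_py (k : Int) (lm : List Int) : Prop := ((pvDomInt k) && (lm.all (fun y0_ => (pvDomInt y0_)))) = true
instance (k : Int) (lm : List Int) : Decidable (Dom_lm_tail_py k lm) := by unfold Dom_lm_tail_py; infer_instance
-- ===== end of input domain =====

-- B replaces A's left-to-right OR accumulator loop (which ORs the first element twice)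
-- by a balanced divide-and-conquer OR-reduction over the index range; same value by
-- associativity and idempotence of bitwise or.


-- ===== PORT A =====
def lm_tail_py (k : Int) (lm : List Int) : Int :=
  let n : Int := lm.length
  let start : Int := k - 1
  let r : Int := PySem.List.pyGetD lm start 0
  (PySem.List.pyRange start n 1).foldl
    (fun r i => PySem.Int.bor r (PySem.List.pyGetD lm i 0)) r

-- ===== PORT B =====
-- helper `_reduce` of Source B: OR-reduce lm[lo:hi] by balanced splitting (the `hi ≤ lo + 1`
-- guard totalizes the Python base case `hi - lo == 1`; Source B only calls it with lo < hi)
def redOrB (lm : List Int) : Nat → Nat → Nat → Int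
  | 0, _, _ => 0
  | fuel + 1, lo, hi =>
    if hi ≤ lo + 1 then PySem.List.pyGetD lm (lo : Int) 0
    else PySem.Int.bor (redOrB lm fuel lo ((lo + hi) / 2)) (redOrB lm fuel ((lo + hi) / 2) hi)

def lm_tail_py_alt (k : Int) (lm : List Int) : Int :=
  redOrB lm (lm.length - (k - 1).toNat) (k - 1).toNat lm.length

-- ===== PRECONDITION & SPEC =====
-- Pre_ excludes exactly the inputs where A's assertions fail (AssertionError): k < 1 or k > len(lm).
def Pre_lm_tail_py (k : Int) (lm : List Int) : Prop := 1 ≤ k ∧ k ≤ (lm.length : Int)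
instance (k : Int) (lm : List Int) : Decidable (Pre_lm_tail_py k lm) := by unfold Pre_lm_tail_py; infer_instance

def pvWitness_lm_tail_py : Int × List Int := (1, [3])

def Spec_lm_tail_py (k : Int) (lm : List Int) (out : Int) : Prop := out = lm_tail_py_alt k lm
instance (k : Int) (lm : List Int) (out : Int) : Decidable (Spec_lm_tail_py k lm out) := by unfold Spec_lm_tail_py; infer_instance

-- ===== CLAIM (what is proved, stated in full; the proofs are below) =====
def Claim_equal_lm_tail_py : Prop := ∀ (k : Int) (lm : List Int), Dom_lm_tail_py k lm → Pre_lm_tail_py k lm → Spec_lm_tail_py k lm (lm_tail_py k lm)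

-- ===== LEMMAS AND PROOFS =====

-- bit semantics of an Int (two's-complement view), used to prove algebraic laws of bor
def pvTb (a : Int) (j : Nat) : Bool :=
  if 0 ≤ a then a.toNat.testBit j else !((-a - 1).toNat.testBit j)

-- subtracting `x &&& y` from x clears exactly those bits: it equals the xor
theorem pv_sub_and (x : Nat) : ∀ y : Nat, x - (x &&& y) = x ^^^ (x &&& y) := by
  induction x using Nat.strong_induction_on with
  | _ x ih =>
    intro y
    rcases Nat.eq_zero_or_pos x with hx | hx
    · subst hx; simp
    · have hlt : x / 2 < x := Nat.div_lt_self hx (by norm_num)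
      have ihh := ih (x / 2) hlt (y / 2)
      have h1 : (x &&& y) / 2 = x / 2 &&& y / 2 := Nat.and_div_two
      have h2 : (x ^^^ (x &&& y)) / 2 = x / 2 ^^^ (x &&& y) / 2 := Nat.xor_div_two
      have hm : (x &&& y) % 2 = x % 2 &&& y % 2 := by
        simpa using Nat.and_mod_two_pow (n := 1) (a := x) (b := y)
      have hz : (x ^^^ (x &&& y)) % 2 = x % 2 ^^^ (x &&& y) % 2 := by
        simpa using Nat.xor_mod_two_pow (n := 1) (a := x) (b := (x &&& y))
      have hle : x &&& y ≤ x := Nat.and_le_left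
      have hle2 : x / 2 &&& y / 2 ≤ x / 2 := Nat.and_le_left
      rw [h1] at h2
      rcases Nat.mod_two_eq_zero_or_one x with hx2 | hx2 <;>
        rcases Nat.mod_two_eq_zero_or_one y with hy2 | hy2
      · have hm' : (x &&& y) % 2 = 0 := by rw [hm, hx2, hy2]; decide
        have hz' : (x ^^^ (x &&& y)) % 2 = 0 := by rw [hz, hx2, hm']; decide
        omega
      · have hm' : (x &&& y) % 2 = 0 := by rw [hm, hx2, hy2]; decide
        have hz' : (x ^^^ (x &&& y)) % 2 = 0 := by rw [hz, hx2, hm']; decide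
        omega
      · have hm' : (x &&& y) % 2 = 0 := by rw [hm, hx2, hy2]; decide
        have hz' : (x ^^^ (x &&& y)) % 2 = 1 := by rw [hz, hx2, hm']; decide
        omega
      · have hm' : (x &&& y) % 2 = 1 := by rw [hm, hx2, hy2]; decide
        have hz' : (x ^^^ (x &&& y)) % 2 = 0 := by rw [hz, hx2, hm']; decide
        omega

theorem pvTb_bor (a b : Int) (j : Nat) :
    pvTb (PySem.Int.bor a b) j = (pvTb a j || pvTb b j) := by
  unfold PySem.Int.bor pvTb
  by_cases ha : 0 ≤ a <;> by_cases hb : 0 ≤ b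
  · simp [ha, hb, Nat.testBit_or]
  · have hneg : ¬ (0 ≤ -((((-b - 1).toNat - ((-b - 1).toNat &&& a.toNat)) : Nat) : Int) - 1) := by omega
    simp only [ha, hb, if_true, if_false, hneg]
    have harg : (-(-((((-b - 1).toNat - ((-b - 1).toNat &&& a.toNat)) : Nat) : Int) - 1) - 1).toNat
        = (-b - 1).toNat - ((-b - 1).toNat &&& a.toNat) := by omega
    rw [harg, pv_sub_and]
    simp only [Nat.testBit_xor, Nat.testBit_and]
    cases (-b - 1).toNat.testBit j <;> cases a.toNat.testBit j <;> rfl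
  · have hneg : ¬ (0 ≤ -((((-a - 1).toNat - ((-a - 1).toNat &&& b.toNat)) : Nat) : Int) - 1) := by omega
    simp only [ha, hb, if_true, if_false, hneg]
    have harg : (-(-((((-a - 1).toNat - ((-a - 1).toNat &&& b.toNat)) : Nat) : Int) - 1) - 1).toNat
        = (-a - 1).toNat - ((-a - 1).toNat &&& b.toNat) := by omega
    rw [harg, pv_sub_and]
    simp only [Nat.testBit_xor, Nat.testBit_and]
    cases (-a - 1).toNat.testBit j <;> cases b.toNat.testBit j <;> rfl
  · have hneg : ¬ (0 ≤ -((((-a - 1).toNat &&& (-b - 1).toNat) : Nat) : Int) - 1) := by omega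
    simp only [ha, hb, if_false, hneg]
    have harg : (-(-((((-a - 1).toNat &&& (-b - 1).toNat) : Nat) : Int) - 1) - 1).toNat
        = (-a - 1).toNat &&& (-b - 1).toNat := by omega
    rw [harg]
    simp [Nat.testBit_and]

theorem pvTb_ext {a b : Int} (h : ∀ j, pvTb a j = pvTb b j) : a = b := by
  unfold pvTb at h
  by_cases ha : 0 ≤ a <;> by_cases hb : 0 ≤ b
  · have := Nat.eq_of_testBit_eq (x := a.toNat) (y := b.toNat)
      (fun j => by simpa [ha, hb] using h j)
    omega
  · exfalso
    set m := a.toNat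
    set n := (-b - 1).toNat
    have hm : m.testBit (m + n) = false :=
      Nat.testBit_lt_two_pow (Nat.lt_of_lt_of_le (Nat.lt_two_pow_self)
        (Nat.pow_le_pow_right (by norm_num) (Nat.le_add_right _ _)))
    have hn : n.testBit (m + n) = false :=
      Nat.testBit_lt_two_pow (Nat.lt_of_lt_of_le (Nat.lt_two_pow_self)
        (Nat.pow_le_pow_right (by norm_num) (Nat.le_add_left _ _)))
    have := h (m + n)
    simp [ha, hb, hm, hn] at this
  · exfalso
    set m := b.toNat
    set n := (-a - 1).toNat
    have hm : m.testBit (m + n) = false :=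
      Nat.testBit_lt_two_pow (Nat.lt_of_lt_of_le (Nat.lt_two_pow_self)
        (Nat.pow_le_pow_right (by norm_num) (Nat.le_add_right _ _)))
    have hn : n.testBit (m + n) = false :=
      Nat.testBit_lt_two_pow (Nat.lt_of_lt_of_le (Nat.lt_two_pow_self)
        (Nat.pow_le_pow_right (by norm_num) (Nat.le_add_left _ _)))
    have := h (m + n)
    simp [ha, hb, hm, hn] at this
  · have := Nat.eq_of_testBit_eq (x := (-a - 1).toNat) (y := (-b - 1).toNat)
      (fun j => by have := h j; simpa [ha, hb] using this)
    omega

theorem pv_bor_assoc (a b c : Int) :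
    PySem.Int.bor (PySem.Int.bor a b) c = PySem.Int.bor a (PySem.Int.bor b c) :=
  pvTb_ext fun j => by simp [pvTb_bor, Bool.or_assoc]

theorem pv_bor_self (a : Int) : PySem.Int.bor a a = a :=
  pvTb_ext fun j => by simp [pvTb_bor]

theorem pv_zero_bor (a : Int) : PySem.Int.bor 0 a = a := by
  rw [PySem.Int.bor_comm]; exact PySem.Int.bor_zero a

-- a left fold of bor factors through the accumulator
theorem pv_foldl_bor_shift (l : List Int) (x : Int) :
    l.foldl PySem.Int.bor x = PySem.Int.bor x (l.foldl PySem.Int.bor 0) := by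
  induction l generalizing x with
  | nil => simp [PySem.Int.bor_zero]
  | cons h t ih =>
    simp only [List.foldl_cons]
    rw [ih (PySem.Int.bor x h), ih (PySem.Int.bor 0 h), pv_zero_bor, pv_bor_assoc]

-- the balanced reduction computes the bor-fold of the slice lm[lo:hi]
theorem pv_redOrB_eq (lm : List Int) (f : Nat) : ∀ lo hi : Nat, hi - lo ≤ f → lo < hi →
    hi ≤ lm.length →
    redOrB lm f lo hi = ((lm.drop lo).take (hi - lo)).foldl PySem.Int.bor 0 := by
  induction f with
  | zero => intro lo hi hd hlt hle; omega
  | succ f ih =>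
    intro lo hi hd hlt hle
    rw [redOrB]
    by_cases hbase : hi ≤ lo + 1
    · have h1 : hi = lo + 1 := by omega
      have hlo : lo < lm.length := by omega
      rw [if_pos hbase, h1]
      have ht1 : lo + 1 - lo = 1 := by omega
      rw [ht1, List.drop_eq_getElem_cons hlo, List.take_succ_cons, List.take_zero]
      rw [PySem.List.pyGetD_eq_getElem (xs := lm) (i := (lo : Int)) (d := 0) (by omega) (by omega)]
      simp [pv_zero_bor]
    · rw [if_neg hbase]
      have hmid1 : lo < (lo + hi) / 2 := by omega
      have hmid2 : (lo + hi) / 2 < hi := by omega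
      rw [ih lo ((lo + hi) / 2) (by omega) hmid1 (by omega),
          ih ((lo + hi) / 2) hi (by omega) hmid2 hle]
      have hsplit : (lm.drop lo).take (hi - lo)
          = (lm.drop lo).take ((lo + hi) / 2 - lo) ++ ((lm.drop ((lo + hi) / 2)).take (hi - (lo + hi) / 2)) := by
        have h2 : hi - lo = ((lo + hi) / 2 - lo) + (hi - (lo + hi) / 2) := by omega
        rw [h2, List.take_add, List.drop_drop]
        have h3 : lo + ((lo + hi) / 2 - lo) = (lo + hi) / 2 := by omega
        rw [h3]
      rw [hsplit, List.foldl_append,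
          pv_foldl_bor_shift (List.take (hi - (lo + hi) / 2) (List.drop ((lo + hi) / 2) lm))
            (List.foldl PySem.Int.bor 0 (List.take ((lo + hi) / 2 - lo) (List.drop lo lm)))]

-- ===== VERDICT (by name: the statement is the Claim_ definition above) =====
theorem lm_tail_py_spec : Claim_equal_lm_tail_py := by
  intro k lm _ hpre
  obtain ⟨hk1, hk2⟩ := hpre
  simp only [Spec_lm_tail_py, lm_tail_py, lm_tail_py_alt]
  set s : Nat := (k - 1).toNat with hs
  have hsl : s < lm.length := by omega
  -- A's side: the range loop is a fold over the dropped suffix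
  rw [PySem.List.foldl_pyRange_pyGetD' lm 0 PySem.Int.bor (PySem.List.pyGetD lm (k - 1) 0) (by omega)]
  rw [PySem.List.pyGetD_eq_getElem lm (i := k - 1) 0 (by omega) (by omega)]
  -- B's side
  rw [pv_redOrB_eq lm (lm.length - s) s lm.length (le_refl _) hsl (le_refl _)]
  have htake : (lm.drop s).take (lm.length - s) = lm.drop s := by
    apply List.take_of_length_le
    simp
  rw [htake]
  simp only [← hs]
  rw [List.drop_eq_getElem_cons hsl]
  simp only [List.foldl_cons]
  rw [pv_zero_bor, pv_bor_self]
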